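-- pv_equiv track=rewrite | github.com/Asen-sketch/collegeWork | lab/2b.py | process
-- ===== SOURCE A (Python) =====
-- def process(arr):
--     if not arr or not arr[0]:
--         return 0
--
--     n = len(arr)
--     countbelow = 0
--
--     sumdiag = sum(arr[i][i] for i in range(n))
--     rowsum = [sum(row) for row in arr]
--
--     for i in range(1, n):
--         for j in range(i):
--             if arr[i][j] < i + j:
--                 countbelow += 1
--
--     result = [sumdiag] + rowsum + [countbelow]
--     return result
-- ===== SOURCE B (Python) =====
-- def process(arr):
--     if not arr or not arr[0]:
--         return 0
--
--     n = len(arr)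
--
--     sumdiag = 0
--     for i, row in enumerate(arr):
--         sumdiag += row[i]
--
--     result = [sumdiag]
--     for row in arr:
--         result.append(sum(row))
--
--     countbelow = 0
--     for i in range(1, n):
--         # count of entries arr[i][j] < i+j (j < i) == number of values arr[i][j]-j below i:
--         # sort the shifted prefix, then a hand-written bisect_left locates that count.
--         adj = sorted(arr[i][j] - j for j in range(i))
--         lo, hi = 0, i
--         while lo < hi:
--             mid = (lo + hi) // 2
--             if adj[mid] < i:
--                 lo = mid + 1
--             else:
--                 hi = mid
--         countbelow += lo
--
--     result.append(countbelow)
--     return result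
-- ===== Notes on version B (the rewrite author's own statement) =====
-- stated objective: alternative
-- what changed: B replaces A's nested below-diagonal scan with sort-then-binary-search per row: it sorts the shifted prefix values arr[i][j]-j and locates the count of values below i with a hand-written bisect_left, and builds the diagonal sum and row sums with separate accumulator loops instead of A's generator-sum and comprehension; trades an O(i) scan per row for O(i log i) sort + O(log i) search.
-- outside the precondition, e.g. on process([]): A returns 0, B returns 0; on process([[]]): A returns 0, B returns 0
import Mathlib
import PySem

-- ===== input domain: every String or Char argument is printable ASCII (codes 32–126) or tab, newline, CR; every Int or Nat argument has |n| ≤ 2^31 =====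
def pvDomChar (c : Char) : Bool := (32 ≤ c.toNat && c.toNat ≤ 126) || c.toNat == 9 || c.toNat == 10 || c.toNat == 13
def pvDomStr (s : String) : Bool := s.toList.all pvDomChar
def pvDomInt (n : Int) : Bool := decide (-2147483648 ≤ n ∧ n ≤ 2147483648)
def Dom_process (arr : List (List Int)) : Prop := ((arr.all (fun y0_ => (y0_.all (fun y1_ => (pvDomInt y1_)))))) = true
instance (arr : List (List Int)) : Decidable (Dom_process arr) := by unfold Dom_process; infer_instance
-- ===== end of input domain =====

-- B counts below-diagonal entries per row by sorting the shifted prefix arr[i][j]-j and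
-- binary-searching for i (a hand-written bisect_left) instead of A's nested linear scans;
-- objective: alternative (sort+search vs linear count, not faster).

-- ===== PORT A =====
-- Port of A. Python returns the INT 0 on the empty guard and raises IndexError on rows
-- shorter than their index; both cases are outside Pre_process, the guard branch returns [].
def process (arr : List (List Int)) : List Int :=
  if arr = [] ∨ arr.headD [] = [] then []
  else
    let n : Int := arr.length
    let sumdiag : Int := (PySem.List.pyRange 0 n 1).foldl
      (fun s i => s + PySem.List.pyGetD (PySem.List.pyGetD arr i []) i 0) 0
    let rowsum : List Int := arr.map List.sum
    let countbelow : Int := (PySem.List.pyRange 1 n 1).foldl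
      (fun c i => (PySem.List.pyRange 0 i 1).foldl
        (fun c j => if PySem.List.pyGetD (PySem.List.pyGetD arr i []) j 0 < i + j
                    then c + 1 else c) c) 0
    sumdiag :: (rowsum ++ [countbelow])

-- ===== PORT B =====
-- Source B's while-loop binary search, verbatim: lo/hi are the nonnegative Python ints,
-- adj[mid] is in range whenever hi ≤ len(adj) (Source B calls it with hi = len(adj) = i).
def pvBS (adj : List Int) (t : Int) (lo hi : Nat) : Nat :=
  if h : lo < hi then
    let mid := (lo + hi) / 2
    if adj.getD mid 0 < t then pvBS adj t (mid + 1) hi else pvBS adj t lo mid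
  else lo
termination_by hi - lo
decreasing_by all_goals omega

-- enumerate pass for the diagonal (indices are nonneg, row[i] in range inside Pre_),
-- append loop for the row sums, sort + pvBS per row for the count.
def process_alt (arr : List (List Int)) : List Int :=
  if arr = [] ∨ arr.headD [] = [] then []
  else
    let n : Int := arr.length
    let sumdiag : Int := arr.zipIdx.foldl (fun s p => s + p.1.getD p.2 0) 0
    let result : List Int := arr.foldl (fun acc row => acc ++ [row.sum]) [sumdiag]
    let countbelow : Int := (PySem.List.pyRange 1 n 1).foldl
      (fun c i =>
        let adj := PySem.List.sorted
          ((PySem.List.pyRange 0 i 1).map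
            (fun j => PySem.List.pyGetD (PySem.List.pyGetD arr i []) j 0 - j))
          (fun x => x) false
        c + (pvBS adj i 0 i.toNat : Int)) 0
    result ++ [countbelow]

-- ===== PRECONDITION & SPEC =====
-- Pre_ excludes (a) empty arr or empty first row, where Python A returns the INT 0, not a
-- list (no value of the declared list type), and (b) rows shorter than their index, where
-- A raises IndexError on arr[i][i].
def Pre_process (arr : List (List Int)) : Prop :=
  arr ≠ [] ∧ ∀ p ∈ arr.zipIdx, p.2 < p.1.length
instance (arr : List (List Int)) : Decidable (Pre_process arr) := by
  unfold Pre_process; infer_instance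
def pvWitness_process : List (List Int) := [[1, 2], [3, 4]]

def Spec_process (arr : List (List Int)) (out : List Int) : Prop := out = process_alt arr
instance (arr : List (List Int)) (out : List Int) : Decidable (Spec_process arr out) := by
  unfold Spec_process; infer_instance

-- ===== CLAIM =====
def Claim_equal_process : Prop :=
  ∀ (arr : List (List Int)), Dom_process arr → Pre_process arr → Spec_process arr (process arr)

-- ===== LEMMAS AND PROOFS =====

-- closed forms of the three quantities, indexed from i
def pvDiag (rows : List (List Int)) (i : Nat) : Int :=
  ((rows.zipIdx i).map (fun p => p.1.getD p.2 0)).sum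

def pvCRow (row : List Int) (i : Nat) : Int :=
  (((row.take i).zipIdx).countP (fun p => decide (p.1 < (i : Int) + (p.2 : Int))) : Int)

def pvCnt (rows : List (List Int)) (i : Nat) : Int :=
  ((rows.zipIdx i).map (fun p => pvCRow p.1 p.2)).sum

-- zipIdx as a map over range (used to line the index loops up with the closed forms)
lemma zipIdx_eq_map_range {α : Type} (l : List α) (d : α) :
    l.zipIdx = (List.range l.length).map (fun j => (l.getD j d, j)) := by
  apply List.ext_getElem
  · simp
  · intro j h1 h2
    have hj : j < l.length := by simpa using h1
    simp [List.getElem_zipIdx, hj]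

lemma map_range_eq_map_zipIdx {β : Type} (arr : List (List Int)) (g : List Int → Nat → β) :
    (List.range arr.length).map (fun i => g (arr.getD i []) i) =
      arr.zipIdx.map (fun p => g p.1 p.2) := by
  rw [zipIdx_eq_map_range arr [], List.map_map]
  rfl

-- A's diagonal fold equals pvDiag arr 0
lemma diag_eq (arr : List (List Int)) :
    (PySem.List.pyRange 0 (arr.length : Int) 1).foldl
      (fun s i => s + PySem.List.pyGetD (PySem.List.pyGetD arr i []) i 0) 0 =
      pvDiag arr 0 := by
  rw [PySem.List.pyRange_zero_natCast, List.foldl_map]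
  have h1 : (List.range arr.length).foldl
      (fun s (i : Nat) => s + PySem.List.pyGetD (PySem.List.pyGetD arr (i : Int) []) (i : Int) 0) 0 =
      (List.range arr.length).foldl
      (fun s i => s + (arr.getD i []).getD i 0) 0 := by
    apply PySem.List.foldl_congr_mem
    intro acc x _; simp
  rw [h1, PySem.List.foldl_add, zero_add]
  unfold pvDiag
  rw [map_range_eq_map_zipIdx arr (fun r i => r.getD i 0)]

-- B's diagonal pass equals pvDiag arr 0
lemma diag_alt_eq (arr : List (List Int)) :
    arr.zipIdx.foldl (fun s p => s + p.1.getD p.2 0) 0 = pvDiag arr 0 := by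
  rw [PySem.List.foldl_add, zero_add]; rfl

-- (take k).zipIdx as a map over range
lemma take_zipIdx_eq (row : List Int) (k : Nat) (hk : k ≤ row.length) :
    (row.take k).zipIdx = (List.range k).map (fun j => (row.getD j 0, j)) := by
  apply List.ext_getElem
  · simp [hk]
  · intro j h1 h2
    have hj : j < k := by simpa [hk] using h2
    have hj' : j < row.length := lt_of_lt_of_le hj hk
    simp [List.getElem_zipIdx, hj', List.getElem_take]

-- A's inner count over range equals pvCRow, for rows long enough
lemma inner_eq (row : List Int) (k : Nat) (hk : k ≤ row.length) (c : Int) :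
    (List.range k).foldl
      (fun c j => if row.getD j 0 < (k : Int) + (j : Int) then c + 1 else c) c =
      c + pvCRow row k := by
  rw [PySem.List.foldl_ite_add_one]
  congr 1
  unfold pvCRow
  rw [take_zipIdx_eq row k hk, List.countP_map]
  rfl

-- a list whose first m positions satisfy p and whose rest does not has countP p = m
lemma countP_of_split (s : List Int) (p : Int → Bool) (m : Nat) (hm : m ≤ s.length)
    (h1 : ∀ k, k < m → p (s.getD k 0))
    (h2 : ∀ k, m ≤ k → k < s.length → ¬ p (s.getD k 0)) :
    s.countP p = m := by
  conv_lhs => rw [← List.take_append_drop m s]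
  rw [List.countP_append]
  have ht : (s.take m).countP p = m := by
    rw [List.countP_eq_length.mpr, List.length_take_of_le hm]
    intro a ha
    obtain ⟨k, hk, hka⟩ := List.mem_iff_getElem.mp ha
    have hkm : k < m := by simpa [hm] using hk
    have hks : k < s.length := lt_of_lt_of_le hkm hm
    rw [List.getElem_take] at hka
    have := h1 k hkm
    rwa [List.getD_eq_getElem s 0 hks, hka] at this
  have hd : (s.drop m).countP p = 0 := by
    rw [List.countP_eq_zero]
    intro a ha
    obtain ⟨k, hk, hka⟩ := List.mem_iff_getElem.mp ha
    have hks : m + k < s.length := by simp at hk; omega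
    rw [List.getElem_drop] at hka
    have := h2 (m + k) (Nat.le_add_right m k) hks
    rwa [List.getD_eq_getElem s 0 hks, hka] at this
  omega

-- Source B's binary search on a sorted list returns the number of elements below t
lemma pvBS_eq_countP (s : List Int) (hs : s.Pairwise (· ≤ ·)) (t : Int) :
    ∀ d lo hi, hi - lo ≤ d → lo ≤ hi → hi ≤ s.length →
    (∀ k, k < lo → s.getD k 0 < t) →
    (∀ k, hi ≤ k → k < s.length → ¬ s.getD k 0 < t) →
    pvBS s t lo hi = s.countP (fun x => decide (x < t)) := by
  have hmono : ∀ k1 k2, k1 ≤ k2 → k2 < s.length → s.getD k1 0 ≤ s.getD k2 0 := by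
    intro k1 k2 hle hk2
    have hk1 : k1 < s.length := lt_of_le_of_lt hle hk2
    rw [List.getD_eq_getElem s 0 hk1, List.getD_eq_getElem s 0 hk2]
    rcases Nat.lt_or_ge k1 k2 with h | h
    · exact List.pairwise_iff_getElem.mp hs k1 k2 hk1 hk2 h
    · have : k1 = k2 := le_antisymm hle h
      subst this; exact le_refl _
  intro d
  induction d with
  | zero =>
      intro lo hi hd hle hhi h1 h2
      have heq : lo = hi := by omega
      subst heq
      rw [pvBS, dif_neg (by omega)]
      exact (countP_of_split s _ lo hhi
        (fun k hk => by simpa using h1 k hk) (fun k hk1 hk2 => by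
          have := h2 k hk1 hk2; simpa using this)).symm
  | succ d ih =>
      intro lo hi hd hle hhi h1 h2
      by_cases hlt : lo < hi
      · rw [pvBS, dif_pos hlt]
        simp only
        set mid := (lo + hi) / 2 with hmid
        have hmlo : lo ≤ mid := by omega
        have hmhi : mid < hi := by omega
        by_cases hb : s.getD mid 0 < t
        · rw [if_pos hb]
          refine ih (mid + 1) hi (by omega) (by omega) hhi ?_ h2
          intro k hk
          exact lt_of_le_of_lt (hmono k mid (by omega) (lt_of_lt_of_le hmhi hhi)) hb
        · rw [if_neg hb]
          refine ih lo mid (by omega) hmlo (le_of_lt (lt_of_lt_of_le hmhi hhi)) h1 ?_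
          intro k hk1 hk2 hc
          exact hb (lt_of_le_of_lt (hmono mid k hk1 hk2) hc)
      · have heq : lo = hi := by omega
        subst heq
        rw [pvBS, dif_neg (by omega)]
        exact (countP_of_split s _ lo hhi
          (fun k hk => by simpa using h1 k hk) (fun k hk1 hk2 => by
            have := h2 k hk1 hk2; simpa using this)).symm

-- B's per-row sort + binary search equals pvCRow
lemma bs_row (row : List Int) (i : Nat) (hi : i ≤ row.length) :
    (pvBS (PySem.List.sorted ((List.range i).map (fun j => row.getD j 0 - (j : Int)))
        (fun x => x) false) (i : Int) 0 i : Int) = pvCRow row i := by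
  set L := (List.range i).map (fun j => row.getD j 0 - (j : Int)) with hL
  set S := PySem.List.sorted L (fun x => x) false with hS
  have hsorted : S.Pairwise (· ≤ ·) := PySem.List.sorted_pairwise L (fun x => x)
  have hlen : S.length = i := by
    rw [hS, PySem.List.length_sorted, hL, List.length_map, List.length_range]
  have hbs : pvBS S (i : Int) 0 i = S.countP (fun x => decide (x < (i : Int))) :=
    pvBS_eq_countP S hsorted (i : Int) i 0 i (by omega) (by omega) (le_of_eq hlen.symm)
      (fun k hk => absurd hk (Nat.not_lt_zero k))
      (fun k hk1 hk2 => absurd (lt_of_lt_of_le hk2 (le_of_eq hlen)) (Nat.not_lt.mpr hk1))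
  have hperm : S.countP (fun x => decide (x < (i : Int))) =
      L.countP (fun x => decide (x < (i : Int))) :=
    (PySem.List.sorted_perm L (fun x => x) false).countP_eq _
  rw [hbs, hperm, hL, List.countP_map]
  unfold pvCRow
  rw [take_zipIdx_eq row i hi, List.countP_map]
  congr 1
  apply List.countP_congr
  intro j _
  simp only [Function.comp_apply, decide_eq_true_eq]
  omega

-- the i = 0 iteration of either count loop is vacuous, so the folds may start the range at 0
lemma range_zero_of_one (f : Int → Int → Int) (h0 : ∀ c, f c 0 = c) (n : Int) (hn : 0 < n) :
    (PySem.List.pyRange 0 n 1).foldl f 0 = (PySem.List.pyRange 1 n 1).foldl f 0 := by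
  rw [PySem.List.pyRange_one_cons hn]
  simp [h0]

-- A's nested count fold equals pvCnt arr 0
lemma cnt_eq (arr : List (List Int)) (hne : arr ≠ [])
    (hlen : ∀ p ∈ arr.zipIdx, p.2 < p.1.length) :
    (PySem.List.pyRange 1 (arr.length : Int) 1).foldl
      (fun c i => (PySem.List.pyRange 0 i 1).foldl
        (fun c j => if PySem.List.pyGetD (PySem.List.pyGetD arr i []) j 0 < i + j
                    then c + 1 else c) c) 0 = pvCnt arr 0 := by
  have h0 : (0 : Int) < (arr.length : Int) := by
    have := List.length_pos_iff.mpr hne; exact_mod_cast this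
  refine Eq.trans (range_zero_of_one _ (fun c => by simp [PySem.List.pyRange_one_eq_nil]) _ h0).symm ?_
  rw [PySem.List.pyRange_zero_natCast, List.foldl_map]
  have heq : (List.range arr.length).foldl
      (fun c (i : Nat) => (PySem.List.pyRange 0 (i : Int) 1).foldl
        (fun c j => if PySem.List.pyGetD (PySem.List.pyGetD arr (i : Int) []) j 0 < (i : Int) + j
                    then c + 1 else c) c) 0 =
      (List.range arr.length).foldl (fun c i => c + pvCRow (arr.getD i []) i) 0 := by
    apply PySem.List.foldl_congr_mem
    intro acc i hi
    have hi' : i < arr.length := List.mem_range.mp hi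
    have hrow : i < (arr.getD i []).length := by
      refine hlen (arr.getD i [], i) ?_
      rw [zipIdx_eq_map_range arr []]
      exact List.mem_map.mpr ⟨i, hi, rfl⟩
    rw [PySem.List.pyRange_zero_natCast, List.foldl_map]
    have h2 : (List.range i).foldl
        (fun c (j : Nat) => if PySem.List.pyGetD (PySem.List.pyGetD arr (i : Int) []) (j : Int) 0 <
            (i : Int) + (j : Int) then c + 1 else c) acc =
        (List.range i).foldl
        (fun c j => if (arr.getD i []).getD j 0 < (i : Int) + (j : Int) then c + 1 else c) acc := by
      apply PySem.List.foldl_congr_mem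
      intro a x _; simp
    rw [h2, inner_eq _ i (le_of_lt hrow)]
  rw [heq, PySem.List.foldl_add, zero_add]
  unfold pvCnt
  rw [map_range_eq_map_zipIdx arr (fun r i => pvCRow r i)]

-- B's sort + binary-search fold equals pvCnt arr 0
lemma cnt_alt_eq (arr : List (List Int)) (hne : arr ≠ [])
    (hlen : ∀ p ∈ arr.zipIdx, p.2 < p.1.length) :
    (PySem.List.pyRange 1 (arr.length : Int) 1).foldl
      (fun c i =>
        c + (pvBS (PySem.List.sorted
          ((PySem.List.pyRange 0 i 1).map
            (fun j => PySem.List.pyGetD (PySem.List.pyGetD arr i []) j 0 - j))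
          (fun x => x) false) i 0 i.toNat : Int)) 0 = pvCnt arr 0 := by
  have h0 : (0 : Int) < (arr.length : Int) := by
    have := List.length_pos_iff.mpr hne; exact_mod_cast this
  refine Eq.trans (range_zero_of_one _ (fun c => by
    simp [PySem.List.pyRange_one_eq_nil, pvBS]) _ h0).symm ?_
  rw [PySem.List.pyRange_zero_natCast, List.foldl_map]
  have heq : (List.range arr.length).foldl
      (fun c (i : Nat) =>
        c + (pvBS (PySem.List.sorted
          ((PySem.List.pyRange 0 (i : Int) 1).map
            (fun j => PySem.List.pyGetD (PySem.List.pyGetD arr (i : Int) []) j 0 - j))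
          (fun x => x) false) (i : Int) 0 (i : Int).toNat : Int)) 0 =
      (List.range arr.length).foldl (fun c i => c + pvCRow (arr.getD i []) i) 0 := by
    apply PySem.List.foldl_congr_mem
    intro acc i hi
    have hi' : i < arr.length := List.mem_range.mp hi
    have hrow : i < (arr.getD i []).length := by
      refine hlen (arr.getD i [], i) ?_
      rw [zipIdx_eq_map_range arr []]
      exact List.mem_map.mpr ⟨i, hi, rfl⟩
    have hadj : (PySem.List.pyRange 0 (i : Int) 1).map
        (fun j => PySem.List.pyGetD (PySem.List.pyGetD arr (i : Int) []) j 0 - j) =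
        (List.range i).map (fun j => (arr.getD i []).getD j 0 - (j : Int)) := by
      rw [PySem.List.pyRange_zero_natCast, List.map_map]
      apply List.map_congr_left
      intro j _; simp
    rw [hadj, Int.toNat_natCast, bs_row _ i (le_of_lt hrow)]
  rw [heq, PySem.List.foldl_add, zero_add]
  unfold pvCnt
  rw [map_range_eq_map_zipIdx arr (fun r i => pvCRow r i)]

-- ===== VERDICT =====
theorem process_spec : Claim_equal_process := by
  intro arr _ hpre
  obtain ⟨hne, hlen⟩ := hpre
  unfold Spec_process process process_alt
  have hguard : ¬ (arr = [] ∨ arr.headD [] = []) := by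
    rintro (h | h)
    · exact hne h
    · cases arr with
      | nil => exact hne rfl
      | cons r rest =>
          have := hlen (r, 0) (by simp [List.zipIdx_cons])
          simp at h
          simp [h] at this
  rw [if_neg hguard, if_neg hguard]
  dsimp only
  rw [diag_eq, diag_alt_eq, cnt_eq arr hne hlen, cnt_alt_eq arr hne hlen,
    PySem.List.foldl_append_singleton_eq_map]
  simp
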